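-- pv_equiv track=rewrite | github.com/SmitVaishnav/GhostCode | python/ghostcode/parsers/python_parser.py | _is_inside_comment
-- ===== SOURCE A (Python) =====
-- def _is_inside_comment(source: str, offset: int) -> bool:
--     """Check if offset is inside a # comment."""
--     line_start = source.rfind("\n", 0, offset) + 1
--     line_prefix = source[line_start:offset]
--     # Check if there's an unquoted # before this position
--     in_str = False
--     quote_ch = None
--     for ch in line_prefix:
--         if not in_str:
--             if ch == "#":
--                 return True
--             if ch in ('"', "'"):
--                 in_str = True
--                 quote_ch = ch
--         else:
--             if ch == quote_ch:
--                 in_str = False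
--     return False
-- ===== SOURCE B (Python) =====
-- def _is_inside_comment(source: str, offset: int) -> bool:
--     """Check if offset is inside a # comment."""
--     line_start = source.rfind("\n", 0, offset) + 1
--     prefix = source[line_start:offset]
--     # Index scan: a quote jumps straight past its closing partner via str.find;
--     # an unterminated string means no later '#' can count, so return False.
--     i = 0
--     n = len(prefix)
--     while i < n:
--         ch = prefix[i]
--         if ch == "#":
--             return True
--         if ch in ('"', "'"):
--             j = prefix.find(ch, i + 1)
--             if j == -1:
--                 return False
--             i = j + 1
--         else:
--             i += 1
--     return False
-- ===== Notes on version B (the rewrite author's own statement) =====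
-- stated objective: alternative
-- what changed: Replaces A's char-by-char state machine with in_str/quote_ch flags by an index loop that, on seeing a quote, jumps straight past its closing partner via str.find (returning False if unterminated), so no string-state flags are maintained.
import Mathlib
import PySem

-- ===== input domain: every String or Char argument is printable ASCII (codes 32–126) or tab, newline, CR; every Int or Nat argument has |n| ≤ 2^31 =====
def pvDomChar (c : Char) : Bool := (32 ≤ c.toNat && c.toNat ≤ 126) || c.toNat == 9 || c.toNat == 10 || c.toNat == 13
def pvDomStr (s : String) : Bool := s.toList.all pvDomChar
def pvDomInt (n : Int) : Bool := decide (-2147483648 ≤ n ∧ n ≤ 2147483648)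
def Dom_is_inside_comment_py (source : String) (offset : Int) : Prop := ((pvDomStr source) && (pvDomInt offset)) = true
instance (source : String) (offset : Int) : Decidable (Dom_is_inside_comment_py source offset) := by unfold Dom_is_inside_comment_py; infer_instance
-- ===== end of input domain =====

-- B replaces A's char-by-char state machine (in_str/quote_ch flags) by an index
-- loop in which a quote jumps straight past its closing partner found by str.find
-- (alternative decomposition; no string-state flags).

-- ===== PORT A =====
-- the for-loop over line_prefix with state (in_str, quote_ch); early 'return True' on '#'
def pvAScan : List Char → Bool → Option Char → Bool
  | [], _, _ => false
  | ch :: rest, inStr, q =>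
    if !inStr then
      if ch = '#' then true
      else if ch = '"' ∨ ch = '\'' then pvAScan rest true (some ch)
      else pvAScan rest false q
    else
      if some ch = q then pvAScan rest false q
      else pvAScan rest inStr q

def is_inside_comment_py (source : String) (offset : Int) : Bool :=
  let cs := source.toList
  let lineStart := PySem.Chars.rfindFrom cs ['\n'] 0 (some offset) + 1
  let linePrefix := PySem.Chars.slice cs (some lineStart) (some offset)
  pvAScan linePrefix false none

-- ===== PORT B =====
-- the index-based while loop; 'prefix.find(ch, i+1)' ported as findIdx? on the drop
-- (Python's absolute index j is i+1 + the relative index, so i becomes i+1+idx+1)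
def pvBLoop (pre : List Char) (i : Nat) : Bool :=
  if h : i < pre.length then
    let ch := pre[i]
    if ch = '#' then true
    else if ch = '"' ∨ ch = '\'' then
      match (pre.drop (i + 1)).findIdx? (· = ch) with
      | none => false
      | some idx => pvBLoop pre (i + 1 + idx + 1)
    else pvBLoop pre (i + 1)
  else false
termination_by pre.length - i
decreasing_by
  all_goals omega

def is_inside_comment_py_alt (source : String) (offset : Int) : Bool :=
  let cs := source.toList
  let lineStart := PySem.Chars.rfindFrom cs ['\n'] 0 (some offset) + 1
  let linePrefix := PySem.Chars.slice cs (some lineStart) (some offset)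
  pvBLoop linePrefix 0

-- ===== PRECONDITION & SPEC =====
def Spec_is_inside_comment_py (source : String) (offset : Int) (out : Bool) : Prop := out = is_inside_comment_py_alt source offset
instance (source : String) (offset : Int) (out : Bool) : Decidable (Spec_is_inside_comment_py source offset out) := by unfold Spec_is_inside_comment_py; infer_instance

-- ===== CLAIM (what is proved, stated in full; the proofs are below) =====
def Claim_equal_is_inside_comment_py : Prop := ∀ (source : String) (offset : Int), Dom_is_inside_comment_py source offset → Spec_is_inside_comment_py source offset (is_inside_comment_py source offset)

-- ===== LEMMAS AND PROOFS =====

-- A's in-string scan (looking for the closing quote ch) equals: find the closing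
-- quote in one step, fail if absent, else resume the plain scan after it.
theorem pvAScan_instr (l : List Char) (ch : Char) :
    pvAScan l true (some ch) =
      match l.findIdx? (· = ch) with
      | none => false
      | some j => pvAScan (l.drop (j + 1)) false (some ch) := by
  induction l with
  | nil => simp [pvAScan]
  | cons c rest ih =>
    rw [pvAScan]
    simp only [Bool.not_true]
    by_cases hc : c = ch
    · subst hc
      simp [List.findIdx?_cons]
    · have hne : ¬ (some c = some ch) := by simp [hc]
      rw [if_neg hne, ih, List.findIdx?_cons]
      simp only [hc, decide_false]
      cases rest.findIdx? (· = ch) with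
      | none => simp
      | some j => simp

-- A's scan of the suffix from position i equals B's index loop at i.
theorem pvScan_eq_aux (n : Nat) : ∀ (pre : List Char) (i : Nat), pre.length - i < n →
    ∀ q, pvAScan (pre.drop i) false q = pvBLoop pre i := by
  induction n with
  | zero => intro pre i h; omega
  | succ n ih =>
    intro pre i hn q
    rw [pvBLoop]
    by_cases h : i < pre.length
    · rw [dif_pos h, List.drop_eq_getElem_cons h, pvAScan]
      simp only [Bool.not_false, ite_true]
      by_cases hh : pre[i] = '#'
      · simp [hh]
      · simp only [if_neg hh]
        by_cases hq : pre[i] = '"' ∨ pre[i] = '\''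
        · simp only [if_pos hq]
          rw [pvAScan_instr]
          cases hf : (pre.drop (i + 1)).findIdx? (· = pre[i]) with
          | none => simp
          | some idx =>
            simp only
            rw [List.drop_drop]
            have hidx : idx < (pre.drop (i + 1)).length := by
              have := List.findIdx?_eq_some_iff_findIdx_eq.mp hf
              omega
            have e : i + 1 + (idx + 1) = i + 1 + idx + 1 := by omega
            rw [e]
            exact ih pre (i + 1 + idx + 1) (by rw [List.length_drop] at hidx; omega) (some pre[i])
        · simp only [if_neg hq]
          exact ih pre (i + 1) (by omega) q
    · rw [dif_neg h, List.drop_eq_nil_of_le (by omega)]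
      simp [pvAScan]

-- ===== VERDICT (by name: the statement is the Claim_ definition above) =====
theorem is_inside_comment_py_spec : Claim_equal_is_inside_comment_py := by
  intro source offset _
  unfold Spec_is_inside_comment_py is_inside_comment_py is_inside_comment_py_alt
  exact pvScan_eq_aux _ _ 0 (Nat.lt_succ_self _) none
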